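-- pv_equiv track=rewrite | github.com/PythonJava098/Trapping-Rain-Water | wOtAr_Trapping.py | elevation
-- ===== SOURCE A (Python) =====
-- def elevation(list1):
--     elevation = []
--     max_alt = max(list1)
--
--     for base in range(1, max_alt+1):
--         data = []
--
--         for num in list1:
--             if num >= base:
--                 data.append(1)
--             else:
--                 data.append(0)
--         elevation.append(data)
--
--     return elevation
-- ===== SOURCE B (Python) =====
-- def elevation(list1):
--     max_alt = max(list1)
--     height = max(max_alt, 0)
--     cols = [[1] * max(num, 0) + [0] * (height - max(num, 0)) for num in list1]
--     return [list(row) for row in zip(*cols)]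
-- ===== Notes on version B (the rewrite author's own statement) =====
-- stated objective: alternative
-- what changed: B builds one 0/1 column profile per element (ones up to the element's clamped height, zero-padded to the maximum height) and transposes the columns with zip, instead of A's row-per-threshold outer loop with an inner scan per base.
import Mathlib
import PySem

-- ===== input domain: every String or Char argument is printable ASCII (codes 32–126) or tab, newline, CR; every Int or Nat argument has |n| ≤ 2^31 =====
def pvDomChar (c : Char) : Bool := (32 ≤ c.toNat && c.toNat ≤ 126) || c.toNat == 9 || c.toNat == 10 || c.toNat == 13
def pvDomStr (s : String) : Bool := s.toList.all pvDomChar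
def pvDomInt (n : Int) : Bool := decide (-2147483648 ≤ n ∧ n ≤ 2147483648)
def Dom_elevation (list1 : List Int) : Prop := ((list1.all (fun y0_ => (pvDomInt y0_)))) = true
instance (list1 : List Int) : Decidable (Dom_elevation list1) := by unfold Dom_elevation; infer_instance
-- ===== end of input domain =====

-- B builds one 0/1 column per element and transposes the columns with zip(*cols),
-- instead of A's row-per-threshold double loop (objective: alternative decomposition, same exact output).

-- ===== PORT A =====
-- row-by-row: for each base in 1..max_alt append the row of threshold indicators
def elevation (list1 : List Int) : List (List Int) :=
  match PySem.List.max? list1 (fun y => y) with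
  | none => []        -- max([]) raises ValueError in Python; excluded by Pre_elevation
  | some max_alt =>
    (PySem.List.pyRange 1 (max_alt + 1) 1).foldl
      (fun elev base =>
        elev ++ [list1.foldl (fun data num => data ++ [if num ≥ base then (1 : Int) else 0]) []])
      []

-- ===== PORT B =====
-- hand port of Python's zip(*cols) (PySem has no zip-of-many): repeatedly yield the tuple of heads
-- until some list is exhausted — exact for zip on lists of ints ('list(row)' is the tuple→list step)
def pvZipStar : List (List Int) → List (List Int)
  | [] => []                                   -- zip() with no arguments is empty
  | ([] :: _) => []
  | ((x :: t) :: rest) =>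
      if rest.any (fun d => d.isEmpty) then []
      else
        (((x :: t) :: rest).map (fun d => d.headD 0)) ::
          pvZipStar (((x :: t) :: rest).map (fun d => d.tail))
termination_by cols => (cols.headD []).length
decreasing_by simp

def elevation_alt (list1 : List Int) : List (List Int) :=
  match PySem.List.max? list1 (fun y => y) with
  | none => []        -- max([]) raises ValueError in Python; excluded by Pre_elevation
  | some max_alt =>
    let height := max max_alt 0
    let cols := list1.map (fun num =>
      List.replicate (max num 0).toNat (1 : Int) ++ List.replicate (height - max num 0).toNat 0)
    pvZipStar cols

-- ===== PRECONDITION & SPEC =====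
-- Pre_ excludes only the empty list, on which both Pythons raise ValueError (max of empty sequence).
def Pre_elevation (list1 : List Int) : Prop := list1 ≠ []
instance (list1 : List Int) : Decidable (Pre_elevation list1) := by unfold Pre_elevation; infer_instance
def pvWitness_elevation : List Int := ([3, 0, 2])

def Spec_elevation (list1 : List Int) (out : List (List Int)) : Prop := out = elevation_alt list1
instance (list1 : List Int) (out : List (List Int)) : Decidable (Spec_elevation list1 out) := by unfold Spec_elevation; infer_instance

-- ===== CLAIM (what is proved, stated in full; the proofs are below) =====
def Claim_equal_elevation : Prop := ∀ (list1 : List Int), Dom_elevation list1 → Pre_elevation list1 → Spec_elevation list1 (elevation list1)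

-- ===== LEMMAS AND PROOFS =====

-- the common grid both sides compute
def pvGrid (H : Nat) (f : Int → Nat) (l : List Int) : List (List Int) :=
  (List.range H).map (fun b => l.map (fun n => if b < f n then (1 : Int) else 0))

lemma pvZipStar_grid (H : Nat) (f : Int → Nat) (l : List Int) (hne : l ≠ [])
    (hb : ∀ n ∈ l, f n ≤ H) :
    pvZipStar (l.map (fun n => List.replicate (f n) (1 : Int) ++ List.replicate (H - f n) 0))
      = pvGrid H f l := by
  induction H generalizing f with
  | zero =>
    obtain ⟨m, rest, rfl⟩ := List.exists_cons_of_ne_nil hne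
    have hm : f m = 0 := Nat.le_zero.mp (hb m (by simp))
    simp [pvZipStar, pvGrid, hm]
  | succ H ih =>
    obtain ⟨m, rest, rfl⟩ := List.exists_cons_of_ne_nil hne
    set l := m :: rest with hl
    have hcol : ∀ n : Int, List.replicate (f n) (1 : Int) ++ List.replicate (H + 1 - f n) 0
        = (if 0 < f n then (1 : Int) else 0) ::
            (List.replicate (f n - 1) (1 : Int) ++ List.replicate (H - (f n - 1)) 0) := by
      intro n
      by_cases h : 0 < f n
      · obtain ⟨k, hk⟩ := Nat.exists_eq_succ_of_ne_zero (Nat.pos_iff_ne_zero.mp h)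
        simp [hk, List.replicate_succ]
      · simp at h
        simp [h, List.replicate_succ]
    have hmap : l.map (fun n => List.replicate (f n) (1 : Int) ++ List.replicate (H + 1 - f n) 0)
        = l.map (fun n => (if 0 < f n then (1 : Int) else 0) ::
            (List.replicate (f n - 1) (1 : Int) ++ List.replicate (H - (f n - 1)) 0)) := by
      exact List.map_congr_left (fun n _ => hcol n)
    rw [hmap, hl]
    simp only [List.map_cons]
    rw [pvZipStar]
    rw [if_neg (by simp [List.any_map, Function.comp])]
    have htail : ((((if 0 < f m then (1:Int) else 0) ::
          (List.replicate (f m - 1) (1:Int) ++ List.replicate (H - (f m - 1)) 0)) ::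
          rest.map (fun n => (if 0 < f n then (1 : Int) else 0) ::
            (List.replicate (f n - 1) (1 : Int) ++ List.replicate (H - (f n - 1)) 0))).map
            (fun d => d.tail))
        = l.map (fun n => List.replicate (f n - 1) (1 : Int) ++ List.replicate (H - (f n - 1)) 0) := by
      simp [hl, List.map_map, Function.comp]
    have hhead : ((((if 0 < f m then (1:Int) else 0) ::
          (List.replicate (f m - 1) (1:Int) ++ List.replicate (H - (f m - 1)) 0)) ::
          rest.map (fun n => (if 0 < f n then (1 : Int) else 0) ::
            (List.replicate (f n - 1) (1 : Int) ++ List.replicate (H - (f n - 1)) 0))).map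
            (fun d => d.headD 0))
        = l.map (fun n => if 0 < f n then (1 : Int) else 0) := by
      simp [hl, List.map_map, Function.comp]
    rw [htail, hhead, ih (fun n => f n - 1) (fun n hn => by have := hb n hn; show f n - 1 ≤ H; omega)]
    unfold pvGrid
    rw [List.range_succ_eq_map]
    have hrow : ∀ (b : Nat) (n : Int),
        (if b < f n - 1 then (1 : Int) else 0) = (if b + 1 < f n then (1 : Int) else 0) := by
      intro b n
      by_cases h : b + 1 < f n
      · rw [if_pos h, if_pos (by omega)]
      · rw [if_neg h, if_neg (by omega)]
    simp only [List.map_cons, List.map_map]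
    congr 1
    refine List.map_congr_left (fun b _ => ?_)
    simp only [Function.comp_apply, Nat.succ_eq_add_one]
    rw [List.map_cons, hrow]
    exact congrArg _ (List.map_congr_left (fun n _ => hrow b n))

-- A's nested loops compute the same grid
lemma elevation_eq_grid (list1 : List Int) (m : Int)
    (hm : PySem.List.max? list1 (fun y => y) = some m) :
    elevation list1 = pvGrid m.toNat (fun n => (max n 0).toNat) list1 := by
  unfold elevation
  rw [hm]
  simp only [PySem.List.foldl_append_singleton_eq_map, List.nil_append]
  rw [PySem.List.pyRange_one]
  unfold pvGrid
  have : (m + 1 - 1).toNat = m.toNat := by omega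
  rw [this, List.map_map]
  refine List.map_congr_left (fun b _ => ?_)
  simp only [Function.comp]
  refine List.map_congr_left (fun n _ => ?_)
  have h1 : (n ≥ 1 + (b : Int)) ↔ (b < (max n 0).toNat) := by omega
  by_cases h : n ≥ 1 + (b : Int)
  · rw [if_pos h, if_pos (h1.mp h)]
  · rw [if_neg h, if_neg (fun hh => h (h1.mpr hh))]

theorem elevation_spec : Claim_equal_elevation := by
  intro list1 _ hpre
  unfold Spec_elevation
  obtain ⟨m, hm⟩ : ∃ m, PySem.List.max? list1 (fun y => y) = some m := by
    cases h : PySem.List.max? list1 (fun y => y) with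
    | none => exact absurd (Iff.mp (PySem.List.max?_eq_none_iff list1 (fun y => y)) h) hpre
    | some m => exact ⟨m, rfl⟩
  rw [elevation_eq_grid list1 m hm]
  unfold elevation_alt
  rw [hm]
  have hb : ∀ n ∈ list1, (max n 0).toNat ≤ m.toNat := by
    intro n hn
    have := PySem.List.max?_isMax hm n hn
    simp at this; omega
  have hcols : list1.map (fun num =>
      List.replicate (max num 0).toNat (1 : Int) ++
        List.replicate (max m 0 - max num 0).toNat 0)
      = list1.map (fun num => List.replicate ((fun n => (max n 0).toNat) num) (1 : Int) ++
          List.replicate (m.toNat - (fun n => (max n 0).toNat) num) 0) := by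
    refine List.map_congr_left (fun n hn => ?_)
    have := hb n hn
    have : (max m 0 - max n 0).toNat = m.toNat - (max n 0).toNat := by omega
    simp [this]
  simp only [hcols]
  exact (pvZipStar_grid m.toNat (fun n => (max n 0).toNat) list1 hpre hb).symm
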